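-- pv_equiv track=rewrite | github.com/josecatela/sgcodewars | day41/day41.py | diana_henninger_day41
-- ===== SOURCE A (Python) =====
-- def diana_henninger_day41(apples):
--     bad_package = None
--     i = 0
--     while i < len(apples):
--         apples[i] = [x for x in apples[i] if x!=0] # remove bad apples
--         if len(apples[i])==0: # if package is empty..
--             del apples[i] # ..remove package
--             i -=1
--         elif len(apples[i])==1: # if there is only one good apple..
--             if bad_package != None: # ..add to another package
--                 apples[bad_package].append(apples[i][0])
--                 del apples[i]
--                 i -= 1
--                 bad_package = None
--             else: bad_package = i # ..else remember bad package
--         i += 1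
--     if bad_package!=None: del apples[bad_package] # remove leftover bad package
--     return apples
-- ===== SOURCE B (Python) =====
-- def diana_henninger_day41(apples):
--     # One forward pass building a new list: carry the pending lone apple's
--     # package by value plus a buffer of packages seen since it; mutates
--     # `apples` in place at the end like the original and returns it.
--     result = []
--     pending = None
--     buffer = []
--     for p in apples:
--         c = [x for x in p if x != 0]
--         if not c:
--             continue
--         if len(c) == 1:
--             if pending is None:
--                 pending = c
--             else:
--                 result.append(pending + c)
--                 result.extend(buffer)
--                 pending = None
--                 buffer = []
--         else:
--             if pending is None:
--                 result.append(c)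
--             else:
--                 buffer.append(c)
--     if pending is not None:
--         result.extend(buffer)
--     apples[:] = result
--     return apples
-- ===== Notes on version B (the rewrite author's own statement) =====
-- stated objective: alternative
-- what changed: Replaces A's in-place while loop with index arithmetic, del-by-index and a remembered bad-package index by a single functional forward pass over the packages that carries the pending singleton's contents plus a buffer of packages seen since it, building a fresh result list (assigned back with apples[:] to keep the in-place mutation).
import Mathlib
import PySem

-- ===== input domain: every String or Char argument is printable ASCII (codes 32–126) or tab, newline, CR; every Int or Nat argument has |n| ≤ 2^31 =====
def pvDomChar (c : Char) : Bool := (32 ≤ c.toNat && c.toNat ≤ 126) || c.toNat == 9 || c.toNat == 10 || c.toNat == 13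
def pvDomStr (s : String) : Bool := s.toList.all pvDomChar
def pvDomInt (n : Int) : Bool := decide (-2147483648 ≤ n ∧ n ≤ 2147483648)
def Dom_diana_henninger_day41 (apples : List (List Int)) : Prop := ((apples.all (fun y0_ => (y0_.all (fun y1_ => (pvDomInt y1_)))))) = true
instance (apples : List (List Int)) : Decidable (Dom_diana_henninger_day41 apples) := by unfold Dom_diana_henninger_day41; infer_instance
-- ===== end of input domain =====

-- B replaces A's in-place while loop (index bookkeeping, del-by-index, a
-- remembered bad-package index) by a single functional forward pass carrying
-- the pending singleton's contents plus a buffer; the equivalence proved here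
-- is about the RETURN value (both Pythons also mutate `apples` in place, and
-- they do so identically).

-- ===== PORT A =====
-- literal port of A's while loop: state = (current list, i, bad_package).
-- `fuel` only makes the loop total: len(apples)-i decreases by exactly 1 per
-- iteration, so fuel = apples.length at the call site never runs out.
-- All indexing (apples[i], apples[bad], del, set) is in range whenever the
-- Python executes it, so List.getD/set/eraseIdx are exact here.
def pvLoopA (fuel : Nat) (apples : List (List Int)) (i : Nat) (bad : Option Nat) :
    List (List Int) × Option Nat :=
  match fuel with
  | 0 => (apples, bad)
  | fuel + 1 =>
    if i < apples.length then
      let c := (apples.getD i []).filter (fun x => x != 0)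
      let ap := apples.set i c
      if c.length = 0 then
        pvLoopA fuel (ap.eraseIdx i) i bad
      else if c.length = 1 then
        match bad with
        | some b =>
            pvLoopA fuel ((ap.set b ((ap.getD b []) ++ [c.getD 0 0])).eraseIdx i) i none
        | none => pvLoopA fuel ap (i + 1) (some i)
      else pvLoopA fuel ap (i + 1) bad
    else (apples, bad)

def diana_henninger_day41 (apples : List (List Int)) : List (List Int) :=
  match pvLoopA apples.length apples 0 none with
  | (res, some b) => res.eraseIdx b
  | (res, none) => res

-- ===== PORT B =====
def pvAltGo (pkgs : List (List Int)) (pending : Option (List Int))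
    (buffer : List (List Int)) : List (List Int) :=
  match pkgs with
  | [] =>
      match pending with
      | some _ => buffer
      | none => []
  | p :: rest =>
      let c := p.filter (fun x => x != 0)
      if c.length = 0 then pvAltGo rest pending buffer
      else if c.length = 1 then
        match pending with
        | none => pvAltGo rest (some c) buffer
        | some s => (s ++ c) :: (buffer ++ pvAltGo rest none [])
      else
        match pending with
        | none => c :: pvAltGo rest none buffer
        | some s => pvAltGo rest (some s) (buffer ++ [c])

def diana_henninger_day41_alt (apples : List (List Int)) : List (List Int) :=
  pvAltGo apples none []

-- ===== PRECONDITION & SPEC =====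
def Spec_diana_henninger_day41 (apples : List (List Int)) (out : List (List Int)) : Prop := out = diana_henninger_day41_alt apples
instance (apples : List (List Int)) (out : List (List Int)) : Decidable (Spec_diana_henninger_day41 apples out) := by unfold Spec_diana_henninger_day41; infer_instance

-- ===== CLAIM (what is proved, stated in full; the proofs are below) =====
def Claim_equal_diana_henninger_day41 : Prop := ∀ (apples : List (List Int)), Dom_diana_henninger_day41 apples → Spec_diana_henninger_day41 apples (diana_henninger_day41 apples)

-- ===== LEMMAS AND PROOFS =====

def pvFin : List (List Int) × Option Nat → List (List Int)
  | (res, some b) => res.eraseIdx b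
  | (res, none) => res

theorem pv_getD_mid {α : Type} (R : List α) (s : α) (X : List α) (d : α) :
    (R ++ s :: X).getD R.length d = s := by
  induction R with
  | nil => rfl
  | cons a R ih => simp

theorem pv_set_mid {α : Type} (R : List α) (s c : α) (X : List α) :
    (R ++ s :: X).set R.length c = R ++ c :: X := by
  induction R with
  | nil => rfl
  | cons a R ih => simp [ih]

theorem pv_eraseIdx_mid {α : Type} (R : List α) (s : α) (X : List α) :
    (R ++ s :: X).eraseIdx R.length = R ++ X := by
  induction R with
  | nil => rfl
  | cons a R ih => simpa using ih

theorem pv_len1 (c : List Int) (h : c.length = 1) : c = [c.getD 0 0] := by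
  match c, h with
  | [a], _ => rfl

-- the loop invariant: the processed prefix is R (with the pending singleton s
-- sitting between R1 and R2 when bad_package is set), the raw suffix is S,
-- and the loop runs for exactly S.length more iterations of net effect.
theorem pv_main (S : List (List Int)) :
    (∀ R : List (List Int),
        pvFin (pvLoopA S.length (R ++ S) R.length none) = R ++ pvAltGo S none []) ∧
    (∀ (R1 : List (List Int)) (s : List Int) (R2 : List (List Int)),
        pvFin (pvLoopA S.length ((R1 ++ s :: R2) ++ S) (R1 ++ s :: R2).length (some R1.length))
          = R1 ++ pvAltGo S (some s) R2) := by
  induction S with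
  | nil =>
      constructor
      · intro R
        simp [pvLoopA, pvFin, pvAltGo]
      · intro R1 s R2
        simp only [List.length_nil, List.append_nil, pvLoopA, pvFin, pvAltGo]
        rw [pv_eraseIdx_mid]
  | cons p S ih =>
      obtain ⟨ihn, ihs⟩ := ih
      constructor
      · intro R
        rw [show (p :: S).length = S.length + 1 from rfl, pvLoopA]
        rw [if_pos (by simp)]
        simp only [pv_getD_mid, pv_set_mid]
        conv_rhs => rw [pvAltGo]
        by_cases h0 : (p.filter (fun x => x != 0)).length = 0
        · rw [if_pos h0, if_pos h0, pv_eraseIdx_mid, ihn R]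
        · rw [if_neg h0, if_neg h0]
          by_cases h1 : (p.filter (fun x => x != 0)).length = 1
          · rw [if_pos h1, if_pos h1]
            have := ihs R (p.filter (fun x => x != 0)) []
            simpa using this
          · rw [if_neg h1, if_neg h1]
            have := ihn (R ++ [p.filter (fun x => x != 0)])
            simpa using this
      · intro R1 s R2
        rw [show (p :: S).length = S.length + 1 from rfl, pvLoopA]
        rw [if_pos (by simp)]
        rw [show (R1 ++ s :: R2) ++ p :: S = R1 ++ s :: (R2 ++ p :: S) by simp]
        rw [show R1 ++ s :: (R2 ++ p :: S) = (R1 ++ s :: R2) ++ p :: S by simp]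
        simp only [pv_getD_mid, pv_set_mid]
        conv_rhs => rw [pvAltGo]
        by_cases h0 : (p.filter (fun x => x != 0)).length = 0
        · rw [if_pos h0, if_pos h0, pv_eraseIdx_mid, ihs R1 s R2]
        · rw [if_neg h0, if_neg h0]
          by_cases h1 : (p.filter (fun x => x != 0)).length = 1
          · rw [if_pos h1, if_pos h1]
            rw [show (R1 ++ s :: R2) ++ (p.filter (fun x => x != 0)) :: S
                  = R1 ++ s :: (R2 ++ (p.filter (fun x => x != 0)) :: S) by simp]
            rw [pv_getD_mid, pv_set_mid]
            rw [show R1 ++ (s ++ [(p.filter (fun x => x != 0)).getD 0 0]) :: (R2 ++ (p.filter (fun x => x != 0)) :: S)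
                  = (R1 ++ (s ++ [(p.filter (fun x => x != 0)).getD 0 0]) :: R2) ++ (p.filter (fun x => x != 0)) :: S by simp]
            rw [show (R1 ++ s :: R2).length = (R1 ++ (s ++ [(p.filter (fun x => x != 0)).getD 0 0]) :: R2).length by simp]
            rw [pv_eraseIdx_mid]
            rw [ihn (R1 ++ (s ++ [(p.filter (fun x => x != 0)).getD 0 0]) :: R2)]
            rw [← pv_len1 _ h1]
            simp
          · rw [if_neg h1, if_neg h1]
            have := ihs R1 s (R2 ++ [p.filter (fun x => x != 0)])
            simpa using this

-- ===== VERDICT (by name: the statement is the Claim_ definition above) =====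
theorem diana_henninger_day41_spec : Claim_equal_diana_henninger_day41 := by
  intro apples _
  unfold Spec_diana_henninger_day41 diana_henninger_day41 diana_henninger_day41_alt
  have := (pv_main apples).1 []
  simp only [List.nil_append, List.length_nil] at this
  rw [← this]
  cases h : pvLoopA apples.length apples 0 none with
  | mk res bad => cases bad <;> simp [pvFin]
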